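-- pv_equiv track=rewrite | github.com/rafex/poc-openwrt-dietpi-raspi3b-raspi4b | backend/python/ai-analyzer/analyzer.py | _social_bucket_for_domain
-- ===== SOURCE A (Python) =====
-- SOCIAL_NETWORK_DOMAINS = {
--     "facebook": ["facebook.com", "fbcdn.net", "messenger.com", "whatsapp.com", "whatsapp.net"],
--     "instagram": ["instagram.com", "cdninstagram.com"],
--     "x": ["twitter.com", "x.com", "twimg.com"],
--     "tiktok": ["tiktok.com", "tiktokcdn.com", "byteoversea.com"],
--     "youtube": ["youtube.com", "youtu.be", "googlevideo.com", "ytimg.com"],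
--     "linkedin": ["linkedin.com", "licdn.com"],
--     "snapchat": ["snapchat.com", "sc-cdn.net"],
-- }
--
-- def _normalize_domain(value: str) -> str:
--     d = str(value or "").strip().lower().rstrip(".")
--     return d
--
-- def _social_bucket_for_domain(domain: str) -> str | None:
--     d = _normalize_domain(domain)
--     for bucket, roots in SOCIAL_NETWORK_DOMAINS.items():
--         for root in roots:
--             r = _normalize_domain(root)
--             if d == r or d.endswith("." + r):
--                 return bucket
--     return None
-- ===== SOURCE B (Python) =====
-- SOCIAL_NETWORK_DOMAINS = {
--     "facebook": ["facebook.com", "fbcdn.net", "messenger.com", "whatsapp.com", "whatsapp.net"],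
--     "instagram": ["instagram.com", "cdninstagram.com"],
--     "x": ["twitter.com", "x.com", "twimg.com"],
--     "tiktok": ["tiktok.com", "tiktokcdn.com", "byteoversea.com"],
--     "youtube": ["youtube.com", "youtu.be", "googlevideo.com", "ytimg.com"],
--     "linkedin": ["linkedin.com", "licdn.com"],
--     "snapchat": ["snapchat.com", "sc-cdn.net"],
-- }
--
--
-- def _normalize_domain(value: str) -> str:
--     d = str(value or "").strip().lower().rstrip(".")
--     return d
--
--
-- # Flat reverse index, built once: normalized root -> bucket.
-- _ROOT_TO_BUCKET = {
--     _normalize_domain(root): bucket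
--     for bucket, roots in SOCIAL_NETWORK_DOMAINS.items()
--     for root in roots
-- }
--
--
-- def _social_bucket_for_domain(domain: str) -> str | None:
--     d = _normalize_domain(domain)
--     # Candidate suffixes of d: d itself, and the part after each dot.
--     candidates = [d] + [d[i + 1:] for i, ch in enumerate(d) if ch == "."]
--     for c in candidates:
--         bucket = _ROOT_TO_BUCKET.get(c)
--         if bucket is not None:
--             return bucket
--     return None
-- ===== Notes on version B (the rewrite author's own statement) =====
-- stated objective: alternative
-- what changed: B inverts the traversal: instead of scanning every (bucket, root) table entry with an endswith test per root, it builds a flat reverse dict root->bucket once and looks up the domain's own dot-suffix candidates in it, returning the first hit.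
import Mathlib
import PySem

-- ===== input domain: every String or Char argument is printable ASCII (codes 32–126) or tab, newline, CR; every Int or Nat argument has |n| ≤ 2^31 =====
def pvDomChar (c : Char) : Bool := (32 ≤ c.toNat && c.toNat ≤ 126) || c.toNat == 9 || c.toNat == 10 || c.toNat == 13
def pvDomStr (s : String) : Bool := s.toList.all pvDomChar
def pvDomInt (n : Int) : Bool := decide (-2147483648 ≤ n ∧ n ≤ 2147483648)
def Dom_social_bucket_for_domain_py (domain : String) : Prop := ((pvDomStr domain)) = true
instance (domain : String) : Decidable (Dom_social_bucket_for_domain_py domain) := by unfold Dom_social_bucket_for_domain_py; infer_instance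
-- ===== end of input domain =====

-- B inverts the traversal: instead of scanning the whole bucket→roots table with an endswith test per root,
-- it precomputes a flat root→bucket index once and looks up each dot-suffix of the domain (alternative decomposition, same result).

-- ===== PORT A =====
def socialTable : List (String × List String) := [
  ("facebook", ["facebook.com", "fbcdn.net", "messenger.com", "whatsapp.com", "whatsapp.net"]),
  ("instagram", ["instagram.com", "cdninstagram.com"]),
  ("x", ["twitter.com", "x.com", "twimg.com"]),
  ("tiktok", ["tiktok.com", "tiktokcdn.com", "byteoversea.com"]),
  ("youtube", ["youtube.com", "youtu.be", "googlevideo.com", "ytimg.com"]),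
  ("linkedin", ["linkedin.com", "licdn.com"]),
  ("snapchat", ["snapchat.com", "sc-cdn.net"])]

-- rstrip(".") ported by hand: drop trailing '.' characters (exact for the single-char strip set ".")
def pvRstripDot (cs : List Char) : List Char := (cs.reverse.dropWhile (· == '.')).reverse

-- _normalize_domain: str(value or "").strip().lower().rstrip(".")  ('value or ""' is the identity on str values)
def pvNormalizeDomain (value : String) : String :=
  String.ofList (pvRstripDot (PySem.Str.lower (PySem.Str.strip (if value == "" then "" else value))).toList)

-- inner loop over roots: true on the first matching root (A then returns the bucket)
def matchRootsA (d : String) : List String → Bool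
  | [] => false
  | root :: rest =>
    let r := pvNormalizeDomain root
    if d == r || PySem.Str.endswith d ("." ++ r) then true else matchRootsA d rest

-- outer loop over the table items
def goA (d : String) : List (String × List String) → Option String
  | [] => none
  | (bucket, roots) :: rest => if matchRootsA d roots then some bucket else goA d rest

def social_bucket_for_domain_py (domain : String) : Option String :=
  goA (pvNormalizeDomain domain) socialTable

-- ===== PORT B =====
-- module-level reverse index: normalized root -> bucket (dict comprehension over the table)
def rootToBucket : PySem.Dict String String :=
  socialTable.foldl
    (fun acc p => p.2.foldl (fun acc2 root => acc2.insert (pvNormalizeDomain root) p.1) acc)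
    PySem.Dict.empty

-- candidates = [d] + [d[i+1:] for i, ch in enumerate(d) if ch == "."]
def candidatesOf (dl : List Char) : List (List Char) :=
  dl :: (PySem.List.enumerate dl).filterMap
    (fun p => if p.2 == '.' then some (PySem.List.slice dl (some (p.1 + 1))) else none)

-- for c in candidates: return the bucket of the first one found in the reverse index
def goB (idx : PySem.Dict String String) : List (List Char) → Option String
  | [] => none
  | c :: rest =>
    match idx.get? (String.ofList c) with
    | some bucket => some bucket
    | none => goB idx rest

def social_bucket_for_domain_py_alt (domain : String) : Option String :=
  let d := pvNormalizeDomain domain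
  goB rootToBucket (candidatesOf d.toList)

-- ===== PRECONDITION & SPEC =====
def Spec_social_bucket_for_domain_py (domain : String) (out : Option String) : Prop := out = social_bucket_for_domain_py_alt domain
instance (domain : String) (out : Option String) : Decidable (Spec_social_bucket_for_domain_py domain out) := by unfold Spec_social_bucket_for_domain_py; infer_instance

-- ===== CLAIM (what is proved, stated in full; the proofs are below) =====
def Claim_equal_social_bucket_for_domain_py : Prop := ∀ (domain : String), Dom_social_bucket_for_domain_py domain → Spec_social_bucket_for_domain_py domain (social_bucket_for_domain_py domain)

-- ===== LEMMAS AND PROOFS =====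

-- "the pattern of root rl matches the normalized domain dl": equal, or a suffix preceded by a dot
def MatchL (dl rl : List Char) : Prop := dl = rl ∨ ('.' :: rl) <:+ dl

-- the table flattened to (root, bucket) pairs in A's scan order
def Rflat : List (String × String) := socialTable.flatMap (fun p => p.2.map (fun r => (r, p.1)))

-- A's nested scan, flattened
def findM (d : String) : List (String × String) → Option String
  | [] => none
  | (root, bucket) :: rest =>
    if d == pvNormalizeDomain root || PySem.Str.endswith d ("." ++ pvNormalizeDomain root) then some bucket
    else findM d rest

lemma findM_block (d : String) (b : String) (roots : List String) (rest : List (String × String)) :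
    findM d (roots.map (fun r => (r, b)) ++ rest) = if matchRootsA d roots then some b else findM d rest := by
  induction roots with
  | nil => simp [matchRootsA]
  | cons r rs ih =>
    rw [List.map_cons, List.cons_append]
    cases hc : (d == pvNormalizeDomain r || PySem.Str.endswith d ("." ++ pvNormalizeDomain r)) with
    | true => simp only [findM, matchRootsA, hc]; simp
    | false => simp only [findM, matchRootsA, hc]; simp [ih]

lemma goA_flatten (d : String) (T : List (String × List String)) :
    goA d T = findM d (T.flatMap (fun p => p.2.map (fun r => (r, p.1)))) := by
  induction T with
  | nil => rfl
  | cons p rest ih =>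
    obtain ⟨b, roots⟩ := p
    simp only [goA, List.flatMap_cons, findM_block, ih]

lemma goA_eq_Rflat (d : String) : goA d socialTable = findM d Rflat := goA_flatten d socialTable

-- the condition A tests ↔ MatchL
lemma cond_iff (d r : String) :
    (d == r || PySem.Str.endswith d ("." ++ r)) = true ↔ MatchL d.toList r.toList := by
  simp [MatchL, PySem.Chars.endswith_iff, String.ext_iff]

lemma dot_suffix_iff (c dl : List Char) :
    ('.' :: c <:+ dl) ↔ ∃ i, ∃ _ : i < dl.length, dl[i] = '.' ∧ dl.drop (i + 1) = c := by
  constructor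
  · rintro ⟨t, rfl⟩
    refine ⟨t.length, by simp, by simp, ?_⟩
    rw [← List.drop_drop, List.drop_left]
    rfl
  · rintro ⟨i, hi, hdot, hdrop⟩
    have h := List.drop_eq_getElem_cons (l := dl) hi
    rw [hdot, hdrop] at h
    exact h ▸ List.drop_suffix i dl

-- candidate membership ↔ MatchL
lemma mem_cands (c dl : List Char) : c ∈ candidatesOf dl ↔ MatchL dl c := by
  simp only [candidatesOf, MatchL, List.mem_cons, List.mem_filterMap, dot_suffix_iff]
  constructor
  · rintro (rfl | ⟨p, hmem, hf⟩)
    · exact Or.inl rfl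
    · right
      obtain ⟨k, hk, rfl⟩ := (PySem.List.mem_enumerate_iff dl 0 p).mp hmem
      by_cases hch : (dl[k] == '.') = true
      · simp only [hch, if_pos] at hf
        refine ⟨k, hk, beq_iff_eq.mp hch, ?_⟩
        rw [PySem.List.slice_from dl (by omega : (0:Int) ≤ 0 + (k:Int) + 1)] at hf
        have hnat : ((0:Int) + (k:Int) + 1).toNat = k + 1 := by omega
        rw [hnat] at hf
        injection hf
      · simp [hch] at hf
  · rintro (rfl | ⟨i, hi, hdot, hdrop⟩)
    · exact Or.inl rfl
    · right
      refine ⟨((0:Int) + (i:Int), dl[i]), (PySem.List.mem_enumerate_iff dl 0 _).mpr ⟨i, hi, rfl⟩, ?_⟩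
      rw [hdot]
      simp only [beq_self_eq_true, if_pos]
      rw [PySem.List.slice_from dl (by omega : (0:Int) ≤ 0 + (i:Int) + 1)]
      have hnat : ((0:Int) + (i:Int) + 1).toNat = i + 1 := by omega
      rw [hnat, hdrop]

-- concrete facts about the 22 roots (kernel-checked)
set_option maxRecDepth 40000 in
lemma fact_norm : ∀ p ∈ Rflat, pvNormalizeDomain p.1 = p.1 := by decide
set_option maxRecDepth 40000 in
lemma fact_keypair : ∀ p ∈ Rflat, ∀ q ∈ Rflat, p.1 = q.1 → p = q := by decide
set_option maxRecDepth 40000 in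
lemma fact_nosub : ∀ p ∈ Rflat, ∀ q ∈ Rflat, p.1 ≠ q.1 → ¬ (('.' :: q.1.toList) <:+ p.1.toList) := by decide
set_option maxRecDepth 40000 in
lemma fact_get : ∀ p ∈ Rflat, rootToBucket.get? p.1 = some p.2 := by decide
set_option maxRecDepth 40000 in
lemma fact_keys : rootToBucket.keys = Rflat.map (·.1) := by decide

lemma dotsub_of_both {a b dl : List Char} (hsa : '.' :: a <:+ dl) (hsb : '.' :: b <:+ dl)
    (hlen : a.length < b.length) : '.' :: a <:+ b := by
  have h := List.suffix_of_suffix_length_le hsa hsb (by simp; omega)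
  rcases List.suffix_cons_iff.mp h with he | ht
  · have := congrArg List.length he; simp at this; omega
  · exact ht

-- no two distinct roots can match the same (normalized) domain
lemma unique_match (dl : List Char) (p q : String × String) (hp : p ∈ Rflat) (hq : q ∈ Rflat)
    (hmp : MatchL dl p.1.toList) (hmq : MatchL dl q.1.toList) : p = q := by
  by_cases heq : p.1 = q.1
  · exact fact_keypair p hp q hq heq
  · exfalso
    have hne' : q.1 ≠ p.1 := fun h => heq h.symm
    rcases hmp with rfl | hsp
    · rcases hmq with he | hsq
      · exact heq (String.ext_iff.mpr he.symm ▸ rfl)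
      · exact fact_nosub p hp q hq heq hsq
    · rcases hmq with rfl | hsq
      · exact fact_nosub q hq p hp hne' hsp
      · have hlen : p.1.toList.length ≠ q.1.toList.length := by
          intro h
          have h1 := List.suffix_of_suffix_length_le hsp hsq (by simp [h])
          have heq2 : ('.' :: p.1.toList) = ('.' :: q.1.toList) :=
            List.IsSuffix.eq_of_length_le h1 (by simp [h])
          exact heq (String.ext_iff.mpr (by injection heq2))
        rcases Nat.lt_or_ge p.1.toList.length q.1.toList.length with hl | hl
        · exact fact_nosub q hq p hp hne' (dotsub_of_both hsp hsq hl)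
        · exact fact_nosub p hp q hq heq (dotsub_of_both hsq hsp (by omega))

lemma findM_eq_none (d : String) (L : List (String × String))
    (h : ∀ p ∈ L, ¬ MatchL d.toList (pvNormalizeDomain p.1).toList) : findM d L = none := by
  induction L with
  | nil => rfl
  | cons p rest ih =>
    obtain ⟨r, b⟩ := p
    have hc : ¬ (d == pvNormalizeDomain r || PySem.Str.endswith d ("." ++ pvNormalizeDomain r)) = true := by
      rw [cond_iff]; exact h (r, b) (List.mem_cons_self ..)
    simp only [findM, if_neg hc]
    exact ih fun p hp => h p (List.mem_cons_of_mem _ hp)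

lemma findM_eq_some (d : String) (L : List (String × String)) (rv : String × String)
    (hmem : rv ∈ L) (hm : MatchL d.toList (pvNormalizeDomain rv.1).toList)
    (huniq : ∀ p ∈ L, MatchL d.toList (pvNormalizeDomain p.1).toList → p = rv) :
    findM d L = some rv.2 := by
  induction L with
  | nil => simp at hmem
  | cons p rest ih =>
    obtain ⟨r, b⟩ := p
    by_cases hc : (d == pvNormalizeDomain r || PySem.Str.endswith d ("." ++ pvNormalizeDomain r)) = true
    · have h := huniq (r, b) (List.mem_cons_self ..) ((cond_iff ..).mp hc)
      simp only [findM, if_pos hc, ← h]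
    · simp only [findM, if_neg hc]
      have hmem' : rv ∈ rest := by
        rcases List.mem_cons.mp hmem with h | h
        · exact absurd ((cond_iff ..).mpr (by simpa [h] using hm)) hc
        · exact h
      exact ih hmem' fun p hp => huniq p (List.mem_cons_of_mem _ hp)

lemma goB_eq_none (idx : PySem.Dict String String) (cs : List (List Char))
    (h : ∀ c ∈ cs, idx.get? (String.ofList c) = none) :
    goB idx cs = none := by
  induction cs with
  | nil => rfl
  | cons c rest ih =>
    simp only [goB, h c (List.mem_cons_self ..)]
    exact ih fun c hc => h c (List.mem_cons_of_mem _ hc)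

lemma goB_eq_some (idx : PySem.Dict String String) (cs : List (List Char)) (v : String)
    (hall : ∀ c ∈ cs, idx.get? (String.ofList c) = none ∨ idx.get? (String.ofList c) = some v)
    (hex : ∃ c ∈ cs, idx.get? (String.ofList c) = some v) :
    goB idx cs = some v := by
  induction cs with
  | nil => simp at hex
  | cons c rest ih =>
    rcases hall c (List.mem_cons_self ..) with h | h
    · simp only [goB, h]
      apply ih (fun c hc => hall c (List.mem_cons_of_mem _ hc))
      obtain ⟨c', hc', hv⟩ := hex
      rcases List.mem_cons.mp hc' with rfl | hc''
      · rw [h] at hv; cases hv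
      · exact ⟨c', hc'', hv⟩
    · simp only [goB, h]

-- a string misses the reverse index iff it is no root of the flattened table
set_option maxRecDepth 40000 in
lemma key_iff (s : String) :
    rootToBucket.get? s = none ↔ ¬ ∃ p ∈ Rflat, p.1 = s := by
  rw [PySem.Dict.get?_eq_none_iff_not_mem_keys, fact_keys]
  simp [List.mem_map]

set_option maxRecDepth 40000 in
lemma core (d : String) : goA d socialTable = goB rootToBucket (candidatesOf d.toList) := by
  rw [goA_eq_Rflat]
  by_cases hex : ∃ p ∈ Rflat, MatchL d.toList p.1.toList
  · obtain ⟨rv, hmem, hm⟩ := hex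
    have huniq : ∀ p ∈ Rflat, MatchL d.toList p.1.toList → p = rv := fun p hp hmp =>
      unique_match d.toList p rv hp hmem hmp hm
    rw [findM_eq_some d _ rv hmem (by rw [fact_norm rv hmem]; exact hm)
      (fun p hp h => huniq p hp (by rwa [fact_norm p hp] at h))]
    symm
    apply goB_eq_some
    · intro c hc
      by_cases hk : ∃ p ∈ Rflat, p.1 = String.ofList c
      · obtain ⟨p, hp, hps⟩ := hk
        have hcl : p.1.toList = c := by rw [hps]; simp
        have hpr : p = rv := huniq p hp (hcl ▸ (mem_cands c d.toList).mp hc)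
        right
        have hg := fact_get p hp
        rw [hps, hpr] at hg
        exact hg
      · left; exact (key_iff _).mpr hk
    · refine ⟨rv.1.toList, (mem_cands _ _).mpr hm, ?_⟩
      rw [show String.ofList rv.1.toList = rv.1 by simp]
      exact fact_get rv hmem
  · rw [findM_eq_none d _ (fun p hp h => hex ⟨p, hp, by rwa [fact_norm p hp] at h⟩)]
    symm
    apply goB_eq_none
    intro c hc
    rw [key_iff]
    rintro ⟨p, hp, hps⟩
    have hcl : p.1.toList = c := by rw [hps]; simp
    exact hex ⟨p, hp, hcl ▸ (mem_cands c d.toList).mp hc⟩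

-- ===== VERDICT (by name: the statement is the Claim_ definition above) =====
theorem social_bucket_for_domain_py_spec : Claim_equal_social_bucket_for_domain_py := by
  intro domain _
  unfold Spec_social_bucket_for_domain_py social_bucket_for_domain_py social_bucket_for_domain_py_alt
  exact core (pvNormalizeDomain domain)
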